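-- pv_equiv track=rewrite | github.com/majochem/SortMaPicture | utilities.py | is_valid_file_tag
-- ===== SOURCE A (Python) =====
-- def concat_strings(strList:list, separator):
-- # takes a list of words and a separator and returns the concatenated string
--
--     outStr = ""
--     for word in strList:
--         if outStr == "":
--             outStr = outStr + word
--         else:
--             outStr = outStr + separator + word
--     return outStr
--
-- def is_valid_file_tag(fileTag:str)-> tuple[bool, str]:
-- # checks for valid tag names, returns boolean and an errorMsg
--
--     # criteria
--     invalidChars = ['\\', '/', ':', '*', '?', '"', '<', '>', '|']
--     invalidCharsStr = concat_strings(invalidChars,', ')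
--     reservedNames = ['CON', 'PRN', 'AUX', 'NUL', 'COM1', 'COM2', 'COM3', 'COM4',
--                       'COM5', 'COM6', 'COM7', 'COM8', 'COM9', 'LPT1', 'LPT2',
--                       'LPT3', 'LPT4', 'LPT5', 'LPT6', 'LPT7', 'LPT8', 'LPT9']
--
--     # error messages
--     errorMsgChar = f"Tags may not contain: {invalidCharsStr}"
--     errorMsgSpace = "Tags may not contain spaces" # added " " because white spaces don't make much sense
--     errorMsgName = " is a protected name and cannot be used in tags" # technically this isn't correcty, but it's much easier to fix it this way
--     errorMsgTroll = "Your tag contains an ASCII control character. If it's in in there you know what that means and why it's bad"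
--
--
--     # Check for invalid characters
--     if any(char in invalidChars for char in fileTag):
--         return (False, errorMsgChar)
--
--     # Check for whitespace
--     if " " in fileTag:
--         return (False, errorMsgSpace)
--
--     # Check for protected names
--     if fileTag in reservedNames:
--         return (False, fileTag + errorMsgName)
--
--     # Check for control characters
--     if any(ord(char) < 32 for char in fileTag):
--         return (False, errorMsgTroll)
--
--     return (True, "Valid Entry")
-- ===== SOURCE B (Python) =====
-- def is_valid_file_tag(fileTag: str) -> tuple[bool, str]:
--     # single pass over the tag collecting three flags, then decide in precedence order
--     invalid = {'\\', '/', ':', '*', '?', '"', '<', '>', '|'}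
--     reserved = {'CON', 'PRN', 'AUX', 'NUL', 'COM1', 'COM2', 'COM3', 'COM4',
--                 'COM5', 'COM6', 'COM7', 'COM8', 'COM9', 'LPT1', 'LPT2',
--                 'LPT3', 'LPT4', 'LPT5', 'LPT6', 'LPT7', 'LPT8', 'LPT9'}
--     has_invalid = has_space = has_control = False
--     for ch in fileTag:
--         if ch in invalid:
--             has_invalid = True
--         elif ch == ' ':
--             has_space = True
--         elif ord(ch) < 32:
--             has_control = True
--     if has_invalid:
--         return (False, 'Tags may not contain: \\, /, :, *, ?, ", <, >, |')
--     if has_space: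
--         return (False, "Tags may not contain spaces")
--     if fileTag in reserved:
--         return (False, fileTag + " is a protected name and cannot be used in tags")
--     if has_control:
--         return (False, "Your tag contains an ASCII control character. If it's in in there you know what that means and why it's bad")
--     return (True, "Valid Entry")
-- ===== Notes on version B (the rewrite author's own statement) =====
-- stated objective: faster
-- what changed: Replaces A's three separate scans of the tag (two any() generator passes and a substring search) and the per-call list-concat construction of the error string with a single for-loop that collects three flags and precomputed literal messages, deciding in the same precedence order.
import Mathlib
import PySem

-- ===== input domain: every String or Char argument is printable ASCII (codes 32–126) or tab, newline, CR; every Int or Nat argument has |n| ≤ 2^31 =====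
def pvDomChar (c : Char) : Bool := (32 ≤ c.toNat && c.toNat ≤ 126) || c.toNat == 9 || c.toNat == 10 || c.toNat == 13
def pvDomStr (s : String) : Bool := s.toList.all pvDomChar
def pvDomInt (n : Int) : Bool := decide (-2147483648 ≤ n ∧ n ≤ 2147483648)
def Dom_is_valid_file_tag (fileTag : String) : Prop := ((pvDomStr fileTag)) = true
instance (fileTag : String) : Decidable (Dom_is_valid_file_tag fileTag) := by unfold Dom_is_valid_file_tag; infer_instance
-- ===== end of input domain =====

-- B replaces A's three separate scans of the tag with ONE pass collecting three flags
-- (objective: constant-factor speedup, one traversal instead of up to three).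

-- ===== PORT A =====
-- helper of A: concat_strings(strList, separator)
def concat_strings (strList : List String) (separator : String) : String :=
  strList.foldl (fun outStr word =>
    if outStr = "" then outStr ++ word else outStr ++ separator ++ word) ""

def is_valid_file_tag (fileTag : String) : Bool × String :=
  let invalidChars : List String := ["\\", "/", ":", "*", "?", "\"", "<", ">", "|"]
  let invalidCharsStr := concat_strings invalidChars ", "
  let reservedNames : List String := ["CON", "PRN", "AUX", "NUL", "COM1", "COM2", "COM3", "COM4",
                      "COM5", "COM6", "COM7", "COM8", "COM9", "LPT1", "LPT2",
                      "LPT3", "LPT4", "LPT5", "LPT6", "LPT7", "LPT8", "LPT9"]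
  let errorMsgChar := "Tags may not contain: " ++ invalidCharsStr
  let errorMsgSpace := "Tags may not contain spaces"
  let errorMsgName := " is a protected name and cannot be used in tags"
  let errorMsgTroll := "Your tag contains an ASCII control character. If it's in in there you know what that means and why it's bad"
  -- `char in invalidChars`: iterating a Python str yields length-1 strings (exact)
  if fileTag.toList.any (fun char => invalidChars.contains (String.ofList [char])) then
    (false, errorMsgChar)
  -- `" " in fileTag`: substring test with a single-char needle = char membership (exact)
  else if fileTag.toList.contains ' ' then
    (false, errorMsgSpace)
  else if reservedNames.contains fileTag then
    (false, fileTag ++ errorMsgName)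
  else if fileTag.toList.any (fun char => char.toNat < 32) then
    (false, errorMsgTroll)
  else
    (true, "Valid Entry")

-- ===== PORT B =====
-- B's per-char tests: membership in the invalid set, space, control character
def pvInv (ch : Char) : Bool := (['\\', '/', ':', '*', '?', '"', '<', '>', '|'] : List Char).contains ch
def pvSp (ch : Char) : Bool := ch = ' '
def pvCt (ch : Char) : Bool := ch.toNat < 32

-- B's loop body: update the three flags for one character (if / elif / elif)
def pvBStep (f : Bool × Bool × Bool) (ch : Char) : Bool × Bool × Bool :=
  if pvInv ch then (true, f.2.1, f.2.2)
  else if pvSp ch then (f.1, true, f.2.2)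
  else if pvCt ch then (f.1, f.2.1, true)
  else f

def is_valid_file_tag_alt (fileTag : String) : Bool × String :=
  let reserved : List String := ["CON", "PRN", "AUX", "NUL", "COM1", "COM2", "COM3", "COM4",
                "COM5", "COM6", "COM7", "COM8", "COM9", "LPT1", "LPT2",
                "LPT3", "LPT4", "LPT5", "LPT6", "LPT7", "LPT8", "LPT9"]
  let flags := fileTag.toList.foldl pvBStep (false, false, false)
  if flags.1 then (false, "Tags may not contain: \\, /, :, *, ?, \", <, >, |")
  else if flags.2.1 then (false, "Tags may not contain spaces")
  else if reserved.contains fileTag then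
    (false, fileTag ++ " is a protected name and cannot be used in tags")
  else if flags.2.2 then
    (false, "Your tag contains an ASCII control character. If it's in in there you know what that means and why it's bad")
  else (true, "Valid Entry")

-- ===== PRECONDITION & SPEC =====
def Spec_is_valid_file_tag (fileTag : String) (out : Bool × String) : Prop := out = is_valid_file_tag_alt fileTag
instance (fileTag : String) (out : Bool × String) : Decidable (Spec_is_valid_file_tag fileTag out) := by unfold Spec_is_valid_file_tag; infer_instance

-- ===== CLAIM (what is proved, stated in full; the proofs are below) =====
def Claim_equal_is_valid_file_tag : Prop := ∀ (fileTag : String), Dom_is_valid_file_tag fileTag → Spec_is_valid_file_tag fileTag (is_valid_file_tag fileTag)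

-- ===== LEMMAS AND PROOFS =====

-- an invalid character is neither a space nor a control character
lemma pvInv_imp (ch : Char) (h : pvInv ch = true) : pvSp ch = false ∧ pvCt ch = false := by
  have h' : ch ∈ (['\\', '/', ':', '*', '?', '"', '<', '>', '|'] : List Char) := by
    simpa [pvInv] using h
  fin_cases h' <;> decide

-- a space is not a control character
lemma pvSp_imp (ch : Char) (h : pvSp ch = true) : pvCt ch = false := by
  have h' : ch = ' ' := by simpa [pvSp] using h
  subst h'; decide

-- one step of B's loop just ORs the three disjoint per-char tests into the flags
lemma pvBStep_eq (f : Bool × Bool × Bool) (ch : Char) :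
    pvBStep f ch = (f.1 || pvInv ch, f.2.1 || pvSp ch, f.2.2 || pvCt ch) := by
  unfold pvBStep
  by_cases h1 : pvInv ch = true
  · obtain ⟨h2, h3⟩ := pvInv_imp ch h1
    simp [h1, h2, h3]
  · by_cases h2 : pvSp ch = true
    · have h3 := pvSp_imp ch h2
      simp [h1, h2, h3]
    · by_cases h3 : pvCt ch = true <;> simp [h1, h2, h3]

-- B's whole fold computes the three `any`s
lemma pvFold_eq (l : List Char) (a b c : Bool) :
    l.foldl pvBStep (a, b, c) = (a || l.any pvInv, b || l.any pvSp, c || l.any pvCt) := by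
  induction l generalizing a b c with
  | nil => simp
  | cons ch t ih =>
    simp only [List.foldl_cons, List.any_cons, pvBStep_eq]
    rw [ih]
    simp [Bool.or_assoc]

-- A's string-list membership of a singleton string = B's char membership
lemma pvMemA_eq (ch : Char) :
    ((["\\", "/", ":", "*", "?", "\"", "<", ">", "|"] : List String).contains (String.ofList [ch]))
      = pvInv ch := by
  rw [Bool.eq_iff_iff]
  simp [pvInv, String.ext_iff]

-- A's char-membership test = any over B's space predicate
lemma pvSpAny_eq (l : List Char) : l.contains ' ' = l.any pvSp := by
  rw [List.contains_eq_mem, Bool.eq_iff_iff]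
  simp only [decide_eq_true_iff, List.any_eq_true, pvSp]
  exact ⟨fun h => ⟨_, h, rfl⟩, fun ⟨x, hx, e⟩ => e ▸ hx⟩

-- ===== VERDICT (by name: the statement is the Claim_ definition above) =====
theorem is_valid_file_tag_spec : Claim_equal_is_valid_file_tag := by
  intro fileTag _
  show is_valid_file_tag fileTag = is_valid_file_tag_alt fileTag
  unfold is_valid_file_tag is_valid_file_tag_alt
  simp only [pvFold_eq, Bool.false_or, pvMemA_eq, ← pvSpAny_eq]
  have hct : (fileTag.toList.any fun char => decide (char.toNat < 32)) = fileTag.toList.any pvCt := rfl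
  rw [hct]
  split_ifs <;> rfl
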